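-- pv_equiv track=rewrite | github.com/muromec/zozol | zozol/ber.py | encode_tag
-- ===== SOURCE A (Python) =====
-- def encode_tag(tag, cls, content, container):
--     container.append(tag | cls << 6)
--     tlen = len(content)
--     if tlen < 128:
--         container.append(tlen)
--     else:
--         len_bytes = []
--         while tlen:
--             len_bytes.append(tlen & 0xFF)
--             tlen >>= 8
--
--         container.append(0x80 | len(len_bytes))
--         while len_bytes:
--             container.append(len_bytes.pop())
--
--     for byte in content:
--         container.append(byte)
--
--     return container
-- ===== SOURCE B (Python) =====
-- def encode_tag(tag, cls, content, container):
--     tlen = len(content)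
--     head = tag | cls << 6
--     if tlen < 128:
--         container += [head, tlen]
--     else:
--         n = (tlen.bit_length() + 7) // 8
--         container += [head, 0x80 | n]
--         container += tlen.to_bytes(n, 'big')
--     container += content
--     return container
-- ===== Notes on version B (the rewrite author's own statement) =====
-- stated objective: simpler
-- what changed: The long-form length encoding replaces the two while-loops (extract little-endian bytes into a stack, then pop them back in reverse) with a closed-form byte count n = (bit_length+7)//8 and a single big-endian to_bytes call.
import Mathlib
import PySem

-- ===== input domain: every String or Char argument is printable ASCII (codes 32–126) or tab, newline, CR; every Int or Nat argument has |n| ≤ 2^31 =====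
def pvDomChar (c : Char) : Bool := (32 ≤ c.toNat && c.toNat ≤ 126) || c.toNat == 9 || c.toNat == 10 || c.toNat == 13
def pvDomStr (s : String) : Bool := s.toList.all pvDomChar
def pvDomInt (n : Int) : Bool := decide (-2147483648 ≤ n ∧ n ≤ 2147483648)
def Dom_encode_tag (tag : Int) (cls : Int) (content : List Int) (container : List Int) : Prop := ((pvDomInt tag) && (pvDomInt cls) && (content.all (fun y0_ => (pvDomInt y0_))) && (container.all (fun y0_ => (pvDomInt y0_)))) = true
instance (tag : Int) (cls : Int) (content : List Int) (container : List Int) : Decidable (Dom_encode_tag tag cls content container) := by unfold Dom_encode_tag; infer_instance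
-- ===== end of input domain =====

-- B replaces A's two while-loops for the long-form length (extract LE bytes, pop in reverse)
-- with a closed-form byte count n = (bit_length+7)//8 and a direct big-endian byte dump: simpler.
-- Both Pythons mutate `container` in place and return it; the theorems here are about the return value.


-- ===== PORT A =====
-- 'while tlen: len_bytes.append(tlen & 0xFF); tlen >>= 8' — tlen = len(content) is nonnegative,
-- so '& 0xFF' is '% 256' and '>>= 8' is '/ 256' exactly.
def pvExtractLE (t : Nat) : List Int :=
  if t = 0 then []
  else ((t % 256 : Nat) : Int) :: pvExtractLE (t / 256)
decreasing_by exact Nat.div_lt_self (by omega) (by omega)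

def encode_tag (tag : Int) (cls : Int) (content : List Int) (container : List Int) : List Int :=
  -- container.append(tag | cls << 6)
  let c1 := container ++ [PySem.Int.bor tag (cls <<< (6 : Nat))]
  let tlen := content.length
  let c2 :=
    if tlen < 128 then c1 ++ [(tlen : Int)]
    else
      let lenBytes := pvExtractLE tlen
      -- container.append(0x80 | len(len_bytes))
      let c := c1 ++ [PySem.Int.bor 128 (lenBytes.length : Int)]
      -- 'while len_bytes: container.append(len_bytes.pop())' pops from the back:
      -- it appends the elements of len_bytes in reverse order, one by one.
      lenBytes.reverse.foldl (fun acc b => acc ++ [b]) c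
  -- for byte in content: container.append(byte)
  content.foldl (fun acc b => acc ++ [b]) c2

-- ===== PORT B =====
-- tlen.to_bytes(n, 'big'): n big-endian base-256 digits of tlen (tlen ≥ 0, tlen < 256^n here).
def pvToBytesBE (n : Nat) (t : Nat) : List Int :=
  match n with
  | 0 => []
  | k + 1 => pvToBytesBE k (t / 256) ++ [((t % 256 : Nat) : Int)]

def encode_tag_alt (tag : Int) (cls : Int) (content : List Int) (container : List Int) : List Int :=
  let tlen := content.length
  let head := PySem.Int.bor tag (cls <<< (6 : Nat))
  let out :=
    if tlen < 128 then container ++ [head, (tlen : Int)]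
    else
      let n := (PySem.Int.bitLength (tlen : Int) + 7) / 8
      (container ++ [head, PySem.Int.bor 128 (n : Int)]) ++ pvToBytesBE n tlen
  out ++ content

-- ===== PRECONDITION & SPEC =====
def Spec_encode_tag (tag : Int) (cls : Int) (content : List Int) (container : List Int) (out : List Int) : Prop := out = encode_tag_alt tag cls content container
instance (tag : Int) (cls : Int) (content : List Int) (container : List Int) (out : List Int) : Decidable (Spec_encode_tag tag cls content container out) := by unfold Spec_encode_tag; infer_instance

-- ===== CLAIM (what is proved, stated in full; the proofs are below) =====
def Claim_equal_encode_tag : Prop := ∀ (tag : Int) (cls : Int) (content : List Int) (container : List Int), Dom_encode_tag tag cls content container → Spec_encode_tag tag cls content container (encode_tag tag cls content container)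

-- ===== LEMMAS AND PROOFS =====

theorem pvFoldlAppend (l : List Int) (c : List Int) :
    l.foldl (fun acc b => acc ++ [b]) c = c ++ l := by
  induction l generalizing c with
  | nil => simp
  | cons x xs ih => simp [List.foldl, ih]

-- Unfolding lemma for pvExtractLE (well-founded definition).
theorem pvExtractLE_eq (t : Nat) :
    pvExtractLE t = if t = 0 then [] else ((t % 256 : Nat) : Int) :: pvExtractLE (t / 256) := by
  rw [pvExtractLE]

theorem pvBitLength_le_of_lt (t k : Nat) (h : t < 2 ^ k) : PySem.Int.bitLength (t : Int) ≤ k := by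
  by_contra hlt
  have h2 : 2 ^ (PySem.Int.bitLength (t : Int) - 1) ≤ (t : Int).natAbs :=
    PySem.Int.two_pow_bitLength_le _ (by
      intro h0
      simp [h0, PySem.Int.bitLength_zero] at hlt)
  have : (2 : Nat) ^ k ≤ 2 ^ (PySem.Int.bitLength (t : Int) - 1) :=
    Nat.pow_le_pow_right (by omega) (by omega)
  simp only [Int.natAbs_natCast] at h2
  omega

theorem pvBitLength_pos (t : Nat) (h : 0 < t) : 0 < PySem.Int.bitLength (t : Int) := by
  by_contra h0
  have hb : PySem.Int.bitLength (t : Int) = 0 := by omega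
  have hlt := PySem.Int.lt_two_pow_bitLength (t : Int)
  rw [hb] at hlt
  simp only [Int.natAbs_natCast, pow_zero] at hlt
  omega

-- Eight halving steps: bitLength t = bitLength (t / 256) + 8 for t ≥ 256.
theorem pvBitLength_div256 (t : Nat) (h : 256 ≤ t) :
    PySem.Int.bitLength (t : Int) = PySem.Int.bitLength ((t / 256 : Nat) : Int) + 8 := by
  rw [@PySem.Int.bitLength_natCast t (by omega)]
  rw [@PySem.Int.bitLength_natCast (t / 2) (by omega)]
  rw [@PySem.Int.bitLength_natCast (t / 2 / 2) (by omega)]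
  rw [@PySem.Int.bitLength_natCast (t / 2 / 2 / 2) (by omega)]
  rw [@PySem.Int.bitLength_natCast (t / 2 / 2 / 2 / 2) (by omega)]
  rw [@PySem.Int.bitLength_natCast (t / 2 / 2 / 2 / 2 / 2) (by omega)]
  rw [@PySem.Int.bitLength_natCast (t / 2 / 2 / 2 / 2 / 2 / 2) (by omega)]
  rw [@PySem.Int.bitLength_natCast (t / 2 / 2 / 2 / 2 / 2 / 2 / 2) (by omega)]
  have : t / 2 / 2 / 2 / 2 / 2 / 2 / 2 / 2 = t / 256 := by omega
  rw [this]

-- The number of bytes A's extraction loop produces is B's closed form (bit_length + 7) // 8.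
theorem pvExtractLE_length (t : Nat) :
    (pvExtractLE t).length = (PySem.Int.bitLength (t : Int) + 7) / 8 := by
  induction t using Nat.strong_induction_on with
  | _ t ih =>
    rw [pvExtractLE_eq]
    by_cases h0 : t = 0
    · simp [h0, PySem.Int.bitLength_zero]
    · simp only [h0, if_false, List.length_cons]
      rw [ih (t / 256) (Nat.div_lt_self (by omega) (by omega))]
      by_cases h256 : t < 256
      · have hd : t / 256 = 0 := by omega
        have h1 : 0 < PySem.Int.bitLength (t : Int) := pvBitLength_pos t (by omega)
        have h8 : PySem.Int.bitLength (t : Int) ≤ 8 := pvBitLength_le_of_lt t 8 (by omega)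
        rw [hd]
        simp only [Nat.cast_zero, PySem.Int.bitLength_zero]
        omega
      · rw [pvBitLength_div256 t (by omega)]
        omega

-- A's extracted bytes, written back in pop (reverse) order, are B's big-endian bytes.
theorem pvExtractLE_reverse (t : Nat) :
    (pvExtractLE t).reverse = pvToBytesBE (pvExtractLE t).length t := by
  induction t using Nat.strong_induction_on with
  | _ t ih =>
    rw [pvExtractLE_eq]
    by_cases h0 : t = 0
    · simp [h0, pvToBytesBE]
    · simp only [h0, if_false, List.reverse_cons, List.length_cons, pvToBytesBE]
      rw [ih (t / 256) (Nat.div_lt_self (by omega) (by omega))]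

-- ===== VERDICT (by name: the statement is the Claim_ definition above) =====
theorem encode_tag_spec : Claim_equal_encode_tag := by
  intro tag cls content container _
  unfold Spec_encode_tag encode_tag encode_tag_alt
  simp only [pvFoldlAppend]
  by_cases h : content.length < 128
  · simp [h]
  · simp only [h, if_false]
    rw [pvExtractLE_reverse, pvExtractLE_length]
    simp [List.append_assoc]
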